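-- pv_equiv track=rewrite | github.com/sloppynacho/Py4GW | Sources/frenkeyLib/Core/encoded_names.py | _parse_number_codepoints
-- ===== SOURCE A (Python) =====
-- _BASE = 0x0100
--
-- _MORE = 0x8000
--
-- _RANGE = _MORE - _BASE  # 0x7F00
--
-- _NUM_TAG_BASE = 0x0101
--
-- _NUM_TAG_MAX = 0x0109
--
-- _STR_TAG_BASE = 0x010A
--
-- _STR_TAG_MAX = 0x011F
--
-- def _is_arg_tag(cp: int) -> bool:
--     return (_NUM_TAG_BASE <= cp <= _NUM_TAG_MAX) or (_STR_TAG_BASE <= cp <= _STR_TAG_MAX)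
--
-- def _parse_number_codepoints(codepoints: tuple[int, ...], start: int) -> tuple[int, int]:
--     """Parse one inline numeric argument encoded with base-0x7F00 digits."""
--     n = len(codepoints)
--     i = start
--     value = 0
--
--     while i < n:
--         cp = codepoints[i]
--         if cp == 0 or cp == 1 or _is_arg_tag(cp):
--             break
--         digit = (cp & 0x7FFF) - _BASE
--         if digit < 0:
--             break
--         if cp & _MORE:
--             value = (value + digit) * _RANGE
--         else:
--             value = value + digit
--             i += 1
--             break
--         i += 1
--
--     if i < n and codepoints[i] == 1:
--         i += 1
--
--     return value, i
-- ===== SOURCE B (Python) =====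
-- _BASE = 0x0100
-- _MORE = 0x8000
-- _RANGE = _MORE - _BASE  # 0x7F00
-- _NUM_TAG_BASE = 0x0101
-- _NUM_TAG_MAX = 0x0109
-- _STR_TAG_BASE = 0x010A
-- _STR_TAG_MAX = 0x011F
--
--
-- def _digit(cp):
--     """Classify cp: (digit, more?) for a valid base-0x7F00 digit, else None."""
--     if cp == 0 or cp == 1 or (_NUM_TAG_BASE <= cp <= _NUM_TAG_MAX) or (_STR_TAG_BASE <= cp <= _STR_TAG_MAX):
--         return None
--     d = (cp & 0x7FFF) - _BASE
--     return None if d < 0 else (d, bool(cp & _MORE))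
--
--
-- def _parse_number_codepoints(codepoints, start):
--     """Two phases: locate the token's end first, then rebuild the value with a
--     separate Horner pass over the consumed index range."""
--     n = len(codepoints)
--     j, closed = start, False
--     while j < n:
--         t = _digit(codepoints[j])
--         if t is None:
--             break
--         j += 1
--         if not t[1]:
--             closed = True
--             break
--
--     value = 0
--     for k in range(start, j):
--         value = value * _RANGE + ((codepoints[k] & 0x7FFF) - _BASE)
--     if not closed:
--         value *= _RANGE
--
--     if j < n and codepoints[j] == 1:
--         j += 1
--     return value, j
-- ===== Notes on version B (the rewrite author's own statement) =====
-- stated objective: alternative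
-- what changed: B splits the work into two passes: a value-free scan (using a codepoint-classifier helper) that only locates the token's end index and whether it was closed, followed by a separate Horner pass over the consumed index range that rebuilds the value (one trailing multiply for an open token), instead of A's single loop that interleaves index advance with per-digit (value+digit)*RANGE / value+digit updates.
import Mathlib
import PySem

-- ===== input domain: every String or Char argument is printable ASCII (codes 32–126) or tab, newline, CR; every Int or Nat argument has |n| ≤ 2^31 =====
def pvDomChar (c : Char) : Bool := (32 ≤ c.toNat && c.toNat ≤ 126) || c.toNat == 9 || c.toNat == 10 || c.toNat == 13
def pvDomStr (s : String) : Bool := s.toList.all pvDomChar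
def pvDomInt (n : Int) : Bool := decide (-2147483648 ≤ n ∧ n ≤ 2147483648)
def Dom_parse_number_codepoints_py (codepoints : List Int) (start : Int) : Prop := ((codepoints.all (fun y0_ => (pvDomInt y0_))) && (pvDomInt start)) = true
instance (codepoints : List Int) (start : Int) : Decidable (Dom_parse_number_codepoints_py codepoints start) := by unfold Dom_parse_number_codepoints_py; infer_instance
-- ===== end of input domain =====

-- B locates the token's end with a value-free scan (digit classifier helper), then
-- rebuilds the value by a separate Horner pass over the consumed index range;
-- same return value as A's single interleaved loop, no speed claim.

-- ===== PORT A =====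
def pnBase : Int := 0x0100
def pnMore : Int := 0x8000
def pnRange : Int := pnMore - pnBase  -- 0x7F00

def is_arg_tag_py (cp : Int) : Bool :=
  (decide (0x0101 ≤ cp) && decide (cp ≤ 0x0109)) || (decide (0x010A ≤ cp) && decide (cp ≤ 0x011F))

-- A's while-loop, state (i, value); `none` from pyGet? would be Python's IndexError
-- (excluded by Pre_), ported as a break.
def pnLoopA (codepoints : List Int) (n : Int) (i : Int) (value : Int) : Int × Int :=
  if _h : i < n then
    match PySem.List.pyGet? codepoints i with
    | none => (value, i)
    | some cp =>
      if cp == 0 || cp == 1 || is_arg_tag_py cp then (value, i)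
      else
        let digit := PySem.Int.band cp 0x7FFF - pnBase
        if digit < 0 then (value, i)
        else if PySem.Int.band cp pnMore ≠ 0 then
          pnLoopA codepoints n (i + 1) ((value + digit) * pnRange)
        else (value + digit, i + 1)
  else (value, i)
termination_by (n - i).toNat
decreasing_by omega

def parse_number_codepoints_py (codepoints : List Int) (start : Int) : Int × Int :=
  let n : Int := codepoints.length
  let r := pnLoopA codepoints n start 0
  let i := if r.2 < n then
             (match PySem.List.pyGet? codepoints r.2 with
              | some cp => if cp == 1 then r.2 + 1 else r.2
              | none => r.2)
           else r.2
  (r.1, i)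

-- ===== PORT B =====
-- Source B's `_digit`: classify a codepoint as a token digit (value, MORE-bit) or a stopper.
def digitB (cp : Int) : Option (Int × Bool) :=
  if cp == 0 || cp == 1 ||
     ((decide (0x0101 ≤ cp) && decide (cp ≤ 0x0109)) ||
      (decide (0x010A ≤ cp) && decide (cp ≤ 0x011F))) then none
  else
    let d := PySem.Int.band cp 0x7FFF - 0x0100
    if d < 0 then none else some (d, PySem.Int.band cp 0x8000 != 0)

-- Source B's phase-1 while-loop: only the stop index and the closed flag, no value.
-- `none` from pyGet? would be Python's IndexError (excluded by Pre_), ported as a break.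
def pnFind (codepoints : List Int) (n : Int) (j : Int) : Int × Bool :=
  if _h : j < n then
    match PySem.List.pyGet? codepoints j with
    | none => (j, false)
    | some cp =>
      match digitB cp with
      | none => (j, false)
      | some t => if t.2 then pnFind codepoints n (j + 1) else (j + 1, true)
  else (j, false)
termination_by (n - j).toNat
decreasing_by omega

-- Source B's phase-2 for-loop: Horner over range(start, j); codepoints[k] is ported as
-- (pyGet? …).getD 0 — exact here since every k in the range was read in phase 1.
def pnHornerB (codepoints : List Int) (a b : Int) : Int :=
  (PySem.List.pyRange a b 1).foldl
    (fun v k => v * 0x7F00 + (PySem.Int.band ((PySem.List.pyGet? codepoints k).getD 0) 0x7FFF - 0x0100)) 0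

def parse_number_codepoints_py_alt (codepoints : List Int) (start : Int) : Int × Int :=
  let n : Int := codepoints.length
  let r := pnFind codepoints n start
  let h := pnHornerB codepoints start r.1
  let value := if r.2 then h else h * 0x7F00
  let j := if decide (r.1 < n) && ((PySem.List.pyGet? codepoints r.1).getD 0 == 1)
           then r.1 + 1 else r.1
  (value, j)

-- ===== PRECONDITION & SPEC =====
-- Pre_ excludes exactly the inputs where Python A raises IndexError:
-- start below -len(codepoints) (B raises there too).
def Pre_parse_number_codepoints_py (codepoints : List Int) (start : Int) : Prop :=
  -(codepoints.length : Int) ≤ start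
instance (codepoints : List Int) (start : Int) : Decidable (Pre_parse_number_codepoints_py codepoints start) := by unfold Pre_parse_number_codepoints_py; infer_instance

def pvWitness_parse_number_codepoints_py : List Int × Int := ([0x8123, 0x0150], 0)

def Spec_parse_number_codepoints_py (codepoints : List Int) (start : Int) (out : Int × Int) : Prop := out = parse_number_codepoints_py_alt codepoints start
instance (codepoints : List Int) (start : Int) (out : Int × Int) : Decidable (Spec_parse_number_codepoints_py codepoints start out) := by unfold Spec_parse_number_codepoints_py; infer_instance

-- ===== CLAIM (what is proved, stated in full; the proofs are below) =====
def Claim_equal_parse_number_codepoints_py : Prop := ∀ (codepoints : List Int) (start : Int), Dom_parse_number_codepoints_py codepoints start → Pre_parse_number_codepoints_py codepoints start → Spec_parse_number_codepoints_py codepoints start (parse_number_codepoints_py codepoints start)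

-- ===== LEMMAS AND PROOFS =====

lemma digitB_none (cp : Int) (h : digitB cp = none) :
    (cp == 0 || cp == 1 || is_arg_tag_py cp) = true ∨ PySem.Int.band cp 0x7FFF - 0x0100 < 0 := by
  rcases h1 : (cp == 0 || cp == 1 || is_arg_tag_py cp) with _ | _
  · unfold is_arg_tag_py at h1
    unfold digitB at h
    rw [h1] at h
    simp only [Bool.false_eq_true, if_false] at h
    split_ifs at h with h2
    exact Or.inr h2
  · exact Or.inl rfl

lemma digitB_some (cp : Int) (t : Int × Bool) (h : digitB cp = some t) :
    (cp == 0 || cp == 1 || is_arg_tag_py cp) = false ∧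
    ¬ (PySem.Int.band cp 0x7FFF - 0x0100 < 0) ∧
    t = (PySem.Int.band cp 0x7FFF - 0x0100, PySem.Int.band cp 0x8000 != 0) := by
  rcases h1 : (cp == 0 || cp == 1 || is_arg_tag_py cp) with _ | _
  · refine ⟨rfl, ?_⟩
    unfold is_arg_tag_py at h1
    unfold digitB at h
    rw [h1] at h
    simp only [Bool.false_eq_true, if_false] at h
    split_ifs at h with h2
    exact ⟨h2, by simpa using h.symm⟩
  · unfold is_arg_tag_py at h1
    unfold digitB at h
    rw [h1] at h
    simp at h

lemma pnFind_ge (codepoints : List Int) (n : Int) (j : Int) :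
    j ≤ (pnFind codepoints n j).1 ∧
    ((pnFind codepoints n j).2 = true → j < (pnFind codepoints n j).1) := by
  induction j using pnFind.induct codepoints n with
  | case1 x h hcp => rw [pnFind]; simp [h, hcp]
  | case2 x h cp hcp hd => rw [pnFind]; simp [h, hcp, hd]
  | case3 x h cp hcp t hd hm ih =>
    rw [pnFind]; simp only [dif_pos h, hcp, hd, if_pos hm]
    exact ⟨by omega, fun hc => by have := ih.1; omega⟩
  | case4 x h cp hcp t hd hm =>
    rw [pnFind]; simp only [dif_pos h, hcp, hd, if_neg hm]
    exact ⟨by omega, fun _ => by omega⟩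
  | case5 x h => rw [pnFind]; simp [h]

lemma horner_from (f : Int → Int) (ks : List Int) : ∀ a : Int,
    ks.foldl (fun v k => v * 0x7F00 + f k) a =
      a * 0x7F00 ^ ks.length + ks.foldl (fun v k => v * 0x7F00 + f k) 0 := by
  induction ks with
  | nil => intro a; simp
  | cons k t ih =>
    intro a
    simp only [List.foldl_cons, List.length_cons]
    rw [ih (a * 0x7F00 + f k), ih (0 * 0x7F00 + f k)]
    ring

lemma pnHornerB_cons (codepoints : List Int) (i j : Int) (hij : i < j) (cp : Int)
    (hcp : PySem.List.pyGet? codepoints i = some cp) :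
    pnHornerB codepoints i j =
      (PySem.Int.band cp 0x7FFF - 0x0100) * 0x7F00 ^ (j - (i + 1)).toNat +
        pnHornerB codepoints (i + 1) j := by
  unfold pnHornerB
  rw [PySem.List.pyRange_one_cons hij, List.foldl_cons, hcp]
  rw [horner_from (fun k => PySem.Int.band ((PySem.List.pyGet? codepoints k).getD 0) 0x7FFF - 0x0100)]
  simp [PySem.List.length_pyRange_one]

lemma pnLoopA_eq_find (codepoints : List Int) (n : Int) (i : Int) : ∀ v : Int,
    pnLoopA codepoints n i v =
      (v * 0x7F00 ^ ((pnFind codepoints n i).1 - i -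
            (if (pnFind codepoints n i).2 then 1 else 0)).toNat +
         (if (pnFind codepoints n i).2 then pnHornerB codepoints i (pnFind codepoints n i).1
          else pnHornerB codepoints i (pnFind codepoints n i).1 * 0x7F00),
       (pnFind codepoints n i).1) := by
  have hR : pnRange = 0x7F00 := by decide
  have hB : pnBase = 0x0100 := by decide
  have hM : pnMore = 0x8000 := by decide
  induction i using pnFind.induct codepoints n with
  | case1 x h hcp =>
    intro v; rw [pnLoopA, pnFind]
    simp [h, hcp, pnHornerB, PySem.List.pyRange_one_eq_nil (le_refl x)]
  | case2 x h cp hcp hd =>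
    intro v
    rcases digitB_none cp hd with hg | hneg
    · rw [pnLoopA, pnFind]
      simp [h, hcp, hd, hg, pnHornerB, PySem.List.pyRange_one_eq_nil (le_refl x)]
    · rw [pnLoopA, pnFind]
      rcases hg : (cp == 0 || cp == 1 || is_arg_tag_py cp) with _ | _
      · simp only [dif_pos h, hcp, hd, hg, Bool.false_eq_true, if_false, hB, if_pos hneg]
        simp [pnHornerB, PySem.List.pyRange_one_eq_nil (le_refl x)]
      · simp [h, hcp, hd, hg, pnHornerB, PySem.List.pyRange_one_eq_nil (le_refl x)]
  | case3 x h cp hcp t hd hm ih =>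
    intro v
    obtain ⟨hg, hneg, ht⟩ := digitB_some cp t hd
    have hmore : PySem.Int.band cp 0x8000 ≠ 0 := by
      have := hm; rw [ht] at this; simpa using this
    rw [pnLoopA, pnFind]
    simp only [dif_pos h, hcp, hd, hg, Bool.false_eq_true, if_false, hB, if_neg hneg,
      if_pos hm, hM, if_pos hmore, hR]
    rw [ih]
    rcases hfind : pnFind codepoints n (x + 1) with ⟨j, c⟩
    have hge := pnFind_ge codepoints n (x + 1)
    rw [hfind] at hge
    have hx1j : x + 1 ≤ j := hge.1
    refine Prod.ext ?_ rfl
    simp only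
    rw [pnHornerB_cons codepoints x j (by omega) cp hcp]
    cases c with
    | true =>
      have hlt : x + 1 < j := hge.2 rfl
      simp only [reduceIte]
      have e1 : (j - x - 1).toNat = (j - (x + 1) - 1).toNat + 1 := by omega
      have e2 : (j - (x + 1)).toNat = (j - (x + 1) - 1).toNat + 1 := by omega
      simp only [e1, e2, pow_succ]
      ring
    | false =>
      simp only [Bool.false_eq_true, if_false]
      have e1 : (j - x - 0).toNat = (j - (x + 1) - 0).toNat + 1 := by omega
      have e2 : (j - (x + 1)).toNat = (j - (x + 1) - 0).toNat := by omega
      simp only [e1, e2, pow_succ]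
      ring
  | case4 x h cp hcp t hd hm =>
    intro v
    obtain ⟨hg, hneg, ht⟩ := digitB_some cp t hd
    have hmore : ¬ PySem.Int.band cp 0x8000 ≠ 0 := by
      have := hm; rw [ht] at this; simpa using this
    rw [pnLoopA, pnFind]
    simp only [dif_pos h, hcp, hd, hg, Bool.false_eq_true, if_false, hB, if_neg hneg,
      if_neg hm, hM, if_neg hmore]
    refine Prod.ext ?_ rfl
    simp only [reduceIte]
    rw [pnHornerB_cons codepoints x (x + 1) (by omega) cp hcp]
    simp [pnHornerB, PySem.List.pyRange_one_eq_nil (le_refl (x + 1))]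
  | case5 x h =>
    intro v; rw [pnLoopA, pnFind]
    simp [h, pnHornerB, PySem.List.pyRange_one_eq_nil (le_refl x)]

-- ===== VERDICT (by name: the statement is the Claim_ definition above) =====
theorem parse_number_codepoints_py_spec : Claim_equal_parse_number_codepoints_py := by
  intro codepoints start _ hpre
  unfold Spec_parse_number_codepoints_py
  simp only [parse_number_codepoints_py, parse_number_codepoints_py_alt, pnLoopA_eq_find,
    zero_mul, zero_add]
  rcases hfind : pnFind codepoints (codepoints.length : Int) start with ⟨j, c⟩
  have hge := pnFind_ge codepoints (codepoints.length : Int) start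
  rw [hfind] at hge
  refine Prod.ext rfl ?_
  simp only
  by_cases hj : j < (codepoints.length : Int)
  · have hjrange : ¬ (PySem.List.pyGet? codepoints j = none) := by
      rw [PySem.List.pyGet?_eq_none_iff]
      unfold Pre_parse_number_codepoints_py at hpre
      intro hnin
      exact hnin ⟨by omega, by simpa using hj⟩
    rcases hcp : PySem.List.pyGet? codepoints j with _ | cp
    · exact absurd hcp hjrange
    · simp only [if_pos hj, Option.getD_some, decide_eq_true hj, Bool.true_and]
  · simp [hj]
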